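-- pv_equiv track=rewrite | github.com/maresmaresmares/bonziPONY | desktop_pet/effect_renderer.py | _parse_anchor
-- ===== SOURCE A (Python) =====
-- from typing import Dict, List, Optional, Tuple
--
-- def _parse_anchor(placement: str, sprite_x: int, sprite_y: int,
--                   sprite_w: int, sprite_h: int) -> Tuple[int, int]:
--     """Parse a placement string (may be compound like 'Bottom_Right')
--     and return the anchor point on the sprite."""
--     p = placement.lower().replace("-", "_")
--
--     # Compound placements (e.g. "bottom_right", "top_left")
--     if "_" in p:
--         parts = p.split("_")
--         # Figure out x and y components
--         ax = sprite_x + sprite_w // 2  # default center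
--         ay = sprite_y + sprite_h // 2
--         for part in parts:
--             if part == "left":
--                 ax = sprite_x
--             elif part == "right":
--                 ax = sprite_x + sprite_w
--             elif part == "top":
--                 ay = sprite_y
--             elif part == "bottom":
--                 ay = sprite_y + sprite_h
--             elif part == "center":
--                 pass  # keep default
--         return ax, ay
--
--     # Simple placements
--     if p == "center":
--         return sprite_x + sprite_w // 2, sprite_y + sprite_h // 2
--     elif p == "right":
--         return sprite_x + sprite_w, sprite_y + sprite_h // 2
--     elif p == "left":
--         return sprite_x, sprite_y + sprite_h // 2
--     elif p == "top":
--         return sprite_x + sprite_w // 2, sprite_y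
--     elif p == "bottom":
--         return sprite_x + sprite_w // 2, sprite_y + sprite_h
--     else:
--         return sprite_x + sprite_w // 2, sprite_y + sprite_h // 2
-- ===== SOURCE B (Python) =====
-- def _parse_anchor(placement, sprite_x, sprite_y, sprite_w, sprite_h):
--     parts = placement.lower().replace("-", "_").split("_")
--     last = {t: i for i, t in enumerate(parts)}
--     li, ri = last.get("left", -1), last.get("right", -1)
--     ti, bi = last.get("top", -1), last.get("bottom", -1)
--     if ri > li:
--         ax = sprite_x + sprite_w
--     elif li >= 0:
--         ax = sprite_x
--     else:
--         ax = sprite_x + sprite_w // 2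
--     if bi > ti:
--         ay = sprite_y + sprite_h
--     elif ti >= 0:
--         ay = sprite_y
--     else:
--         ay = sprite_y + sprite_h // 2
--     return ax, ay
-- ===== Notes on version B (the rewrite author's own statement) =====
-- stated objective: alternative
-- what changed: Replaces A's two code paths (forward overwrite loop for compound placements plus a separate if/elif ladder for simple ones) by building a last-index hash map {token: position} in one comprehension and deciding each axis purely by comparing the stored last indices of the two opposing edge tokens, so no token-dispatch loop or placement ladder remains.
import Mathlib
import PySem

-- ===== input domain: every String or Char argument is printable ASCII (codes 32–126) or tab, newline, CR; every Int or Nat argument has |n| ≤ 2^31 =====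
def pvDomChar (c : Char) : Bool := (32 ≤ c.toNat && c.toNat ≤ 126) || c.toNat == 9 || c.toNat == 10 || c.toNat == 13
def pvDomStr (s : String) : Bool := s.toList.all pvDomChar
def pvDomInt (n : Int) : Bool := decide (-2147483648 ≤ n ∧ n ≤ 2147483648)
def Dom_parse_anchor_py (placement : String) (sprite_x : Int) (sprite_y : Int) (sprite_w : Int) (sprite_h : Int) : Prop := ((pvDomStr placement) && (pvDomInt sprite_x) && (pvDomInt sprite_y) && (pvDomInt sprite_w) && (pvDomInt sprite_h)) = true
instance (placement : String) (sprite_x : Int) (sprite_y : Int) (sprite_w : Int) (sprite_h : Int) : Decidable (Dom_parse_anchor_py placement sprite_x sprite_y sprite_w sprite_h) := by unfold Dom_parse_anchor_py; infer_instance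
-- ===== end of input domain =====

-- B replaces A's two code paths (forward overwrite loop for compound placements + a separate
-- if/elif ladder for simple ones) by a last-index dict built once over the split parts;
-- each axis is then decided by comparing the stored last indices of its two edge tokens.

-- ===== PORT A =====
-- the body of A's `for part in parts` loop
def pvAStep (sprite_x : Int) (sprite_y : Int) (sprite_w : Int) (sprite_h : Int)
    (a : Int × Int) (part : String) : Int × Int :=
  if part = "left" then (sprite_x, a.2)
  else if part = "right" then (sprite_x + sprite_w, a.2)
  else if part = "top" then (a.1, sprite_y)
  else if part = "bottom" then (a.1, sprite_y + sprite_h)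
  else if part = "center" then a
  else a

def parse_anchor_py (placement : String) (sprite_x : Int) (sprite_y : Int) (sprite_w : Int) (sprite_h : Int) : Int × Int :=
  let p := PySem.Str.replace (PySem.Str.lower placement) "-" "_"
  if PySem.Str.isIn "_" p then
    -- split? is `some` here since the separator "_" is nonempty
    let parts := (PySem.Str.split? p "_").getD []
    parts.foldl (pvAStep sprite_x sprite_y sprite_w sprite_h)
      (sprite_x + PySem.Int.floordiv sprite_w 2, sprite_y + PySem.Int.floordiv sprite_h 2)
  else if p = "center" then (sprite_x + PySem.Int.floordiv sprite_w 2, sprite_y + PySem.Int.floordiv sprite_h 2)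
  else if p = "right" then (sprite_x + sprite_w, sprite_y + PySem.Int.floordiv sprite_h 2)
  else if p = "left" then (sprite_x, sprite_y + PySem.Int.floordiv sprite_h 2)
  else if p = "top" then (sprite_x + PySem.Int.floordiv sprite_w 2, sprite_y)
  else if p = "bottom" then (sprite_x + PySem.Int.floordiv sprite_w 2, sprite_y + sprite_h)
  else (sprite_x + PySem.Int.floordiv sprite_w 2, sprite_y + PySem.Int.floordiv sprite_h 2)

-- ===== PORT B =====
def parse_anchor_py_alt (placement : String) (sprite_x : Int) (sprite_y : Int) (sprite_w : Int) (sprite_h : Int) : Int × Int :=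
  let parts := (PySem.Str.split? (PySem.Str.replace (PySem.Str.lower placement) "-" "_") "_").getD []
  -- `last = {t: i for i, t in enumerate(parts)}` (dict comprehension: later duplicates overwrite)
  let last := (PySem.List.enumerate parts).foldl (fun d p => d.insert p.2 p.1) PySem.Dict.empty
  let li := last.getD "left" (-1)
  let ri := last.getD "right" (-1)
  let ti := last.getD "top" (-1)
  let bi := last.getD "bottom" (-1)
  let ax := if li < ri then sprite_x + sprite_w
            else if 0 ≤ li then sprite_x
            else sprite_x + PySem.Int.floordiv sprite_w 2
  let ay := if ti < bi then sprite_y + sprite_h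
            else if 0 ≤ ti then sprite_y
            else sprite_y + PySem.Int.floordiv sprite_h 2
  (ax, ay)

-- ===== PRECONDITION & SPEC =====
def Spec_parse_anchor_py (placement : String) (sprite_x : Int) (sprite_y : Int) (sprite_w : Int) (sprite_h : Int) (out : Int × Int) : Prop := out = parse_anchor_py_alt placement sprite_x sprite_y sprite_w sprite_h
instance (placement : String) (sprite_x : Int) (sprite_y : Int) (sprite_w : Int) (sprite_h : Int) (out : Int × Int) : Decidable (Spec_parse_anchor_py placement sprite_x sprite_y sprite_w sprite_h out) := by unfold Spec_parse_anchor_py; infer_instance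

-- ===== CLAIM (what is proved, stated in full; the proofs are below) =====
def Claim_equal_parse_anchor_py : Prop := ∀ (placement : String) (sprite_x : Int) (sprite_y : Int) (sprite_w : Int) (sprite_h : Int), Dom_parse_anchor_py placement sprite_x sprite_y sprite_w sprite_h → Spec_parse_anchor_py placement sprite_x sprite_y sprite_w sprite_h (parse_anchor_py placement sprite_x sprite_y sprite_w sprite_h)

-- ===== LEMMAS AND PROOFS =====

-- A's last-wins overwrite loop equals a first-match scan over the reversed parts, per axis.
theorem pvFoldl_eq_find (sprite_x sprite_y sprite_w sprite_h : Int)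
    (parts : List String) (ax ay : Int) :
    parts.foldl (pvAStep sprite_x sprite_y sprite_w sprite_h) (ax, ay) =
      ((match parts.reverse.find? (fun t => t == "left" || t == "right") with
        | some t => if t = "left" then sprite_x else sprite_x + sprite_w
        | none => ax),
       (match parts.reverse.find? (fun t => t == "top" || t == "bottom") with
        | some t => if t = "top" then sprite_y else sprite_y + sprite_h
        | none => ay)) := by
  induction parts generalizing ax ay with
  | nil => simp
  | cons t rest ih =>
    simp only [List.foldl_cons, List.reverse_cons, List.find?_append]
    rcases h : pvAStep sprite_x sprite_y sprite_w sprite_h (ax, ay) t with ⟨ax', ay'⟩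
    rw [ih ax' ay']
    have h1 : ax' = (pvAStep sprite_x sprite_y sprite_w sprite_h (ax, ay) t).1 := by rw [h]
    have h2 : ay' = (pvAStep sprite_x sprite_y sprite_w sprite_h (ax, ay) t).2 := by rw [h]
    subst h1 h2
    simp only [Prod.mk.injEq]
    constructor <;>
    · cases hx : rest.reverse.find? (fun t => t == "left" || t == "right") <;>
      cases hy : rest.reverse.find? (fun t => t == "top" || t == "bottom") <;>
      simp only [Option.or, List.find?_singleton] <;>
      simp [pvAStep] <;> split_ifs <;> simp_all

-- If the (nonempty) separator is a prefix of no suffix of l, splitOn.go just returns the whole input.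
theorem pvGo_eq (sep : List Char) (fuel : Nat) :
    ∀ (l cur : List Char) (acc : List (List Char)),
      (∀ j, sep.isPrefixOf (l.drop j) = false) →
      PySem.Chars.splitOn.go sep fuel l cur acc = ((cur.reverse ++ l) :: acc).reverse := by
  induction fuel with
  | zero => intro l cur acc _; rfl
  | succ fuel ih =>
    intro l cur acc h
    cases l with
    | nil => simp [PySem.Chars.splitOn.go]
    | cons c rest =>
      have h0 := h 0
      simp only [List.drop_zero] at h0
      rw [PySem.Chars.splitOn.go]
      simp only [h0, Bool.false_eq_true, if_false]
      rw [ih rest (c :: cur) acc (fun j => by simpa using h (j + 1))]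
      simp

theorem pvSplit_no_sep (s : List Char) (sep : List Char) (hne : sep ≠ [])
    (h : PySem.Chars.isIn sep s = false) :
    PySem.Chars.split? s sep = some [s] := by
  have hpref : ∀ j, sep.isPrefixOf (s.drop j) = false := by
    intro j
    by_contra hc
    have hpre : sep <+: s.drop j := List.isPrefixOf_iff_prefix.mp (by simpa using hc)
    have hinf : sep <:+: s := hpre.isInfix.trans (List.drop_suffix j s).isInfix
    have : PySem.Chars.isIn sep s = true := (PySem.Chars.isIn_iff_infix sep s).mpr hinf
    simp [this] at h
  unfold PySem.Chars.split? PySem.Chars.splitOn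
  simp only [List.isEmpty_iff, hne, if_false]
  rw [pvGo_eq sep (s.length + 1) s [] [] hpref]
  simp

-- B's dict comprehension: the last-wins getD is the first match in the reversed enumeration.
theorem pvDict_getD_last (l : List (Int × String)) (d : PySem.Dict String Int) (t : String) :
    (l.foldl (fun d p => d.insert p.2 p.1) d).getD t (-1) =
      match l.reverse.find? (fun p => p.2 == t) with
      | some p => p.1
      | none => d.getD t (-1) := by
  induction l generalizing d with
  | nil => simp
  | cons q rest ih =>
    simp only [List.foldl_cons, List.reverse_cons, List.find?_append]
    rw [ih]
    cases hr : rest.reverse.find? (fun p => p.2 == t) with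
    | some p => simp
    | none =>
      simp only [Option.none_or, List.find?_singleton]
      by_cases hq : q.2 = t
      · simp [hq]
      · simp [hq, PySem.Dict.getD_insert, Ne.symm hq]

-- last index of token `a` in `enumerate parts s`, sentinel `s - 1` when absent
def pvLastIdx (a : String) (parts : List String) (s : Int) : Int :=
  (((PySem.List.enumerate parts s).reverse.find? (fun p => p.2 == a)).map Prod.fst).getD (s - 1)

-- Trichotomy: the reverse first-match of {a, b} in parts is decided by comparing last indices.
theorem pvTrich (a b : String) (hab : a ≠ b) (parts : List String) (s : Int) :
    (parts.reverse.find? (fun t => t == a || t == b) = none ∧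
      pvLastIdx a parts s = s - 1 ∧ pvLastIdx b parts s = s - 1) ∨
    (parts.reverse.find? (fun t => t == a || t == b) = some a ∧
      pvLastIdx b parts s < pvLastIdx a parts s ∧ s ≤ pvLastIdx a parts s) ∨
    (parts.reverse.find? (fun t => t == a || t == b) = some b ∧
      pvLastIdx a parts s < pvLastIdx b parts s ∧ s ≤ pvLastIdx b parts s) := by
  induction parts generalizing s with
  | nil => left; simp [pvLastIdx]
  | cons x rest ih =>
    have hx : ∀ (c : String),
        pvLastIdx c (x :: rest) s =
          ((((PySem.List.enumerate rest (s+1)).reverse.find? (fun p => p.2 == c)).map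
            Prod.fst).getD (if x = c then s else s - 1)) := by
      intro c
      unfold pvLastIdx
      rw [PySem.List.enumerate_cons]
      simp only [List.reverse_cons, List.find?_append, List.find?_singleton]
      cases (PySem.List.enumerate rest (s+1)).reverse.find? (fun p => p.2 == c) with
      | some p => simp
      | none => by_cases h : x = c <;> simp [h]
    have hf : (x :: rest).reverse.find? (fun t => t == a || t == b) =
        ((rest.reverse.find? (fun t => t == a || t == b)).or
          (if x = a ∨ x = b then some x else none)) := by
      simp only [List.reverse_cons, List.find?_append, List.find?_singleton]
      by_cases h1 : x = a <;> by_cases h2 : x = b <;> simp [h1, h2]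
    have hge : ∀ (c : String) (p : Int × String),
        (PySem.List.enumerate rest (s+1)).reverse.find? (fun p => p.2 == c) = some p →
        s + 1 ≤ p.1 := by
      intro c p hp
      have hm := List.mem_of_find?_eq_some hp
      rw [List.mem_reverse, PySem.List.mem_enumerate_iff] at hm
      obtain ⟨k, hk, rfl⟩ := hm
      omega
    rcases ih (s + 1) with ⟨h0, ha0, hb0⟩ | ⟨h1, hlt, hs⟩ | ⟨h1, hlt, hs⟩
    · -- neither a nor b occurs in rest
      unfold pvLastIdx at ha0 hb0
      rw [hf, h0, Option.none_or]
      rcases hfa : (PySem.List.enumerate rest (s+1)).reverse.find? (fun p => p.2 == a) with _ | p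
      · rcases hfb : (PySem.List.enumerate rest (s+1)).reverse.find? (fun p => p.2 == b) with _ | q
        · simp only [hx, hfa, hfb]
          by_cases h1 : x = a
          · subst h1
            right; left
            refine ⟨by simp, ?_, ?_⟩ <;> simp [hab]
          · by_cases h2 : x = b
            · subst h2
              right; right
              refine ⟨by simp [h1], ?_, ?_⟩ <;> simp [h1]
            · left
              refine ⟨by simp [h1, h2], ?_, ?_⟩ <;> simp [h1, h2]
        · rw [hfb] at hb0; simp at hb0; have := hge b q hfb; omega
      · rw [hfa] at ha0; simp at ha0; have := hge a p hfa; omega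
    · -- a is the winner in rest
      right; left
      rw [hf, h1]
      refine ⟨rfl, ?_, ?_⟩ <;>
      · simp only [hx]
        unfold pvLastIdx at hlt hs
        rcases hfa : (PySem.List.enumerate rest (s+1)).reverse.find? (fun p => p.2 == a) with _ | p <;>
        rcases hfb : (PySem.List.enumerate rest (s+1)).reverse.find? (fun p => p.2 == b) with _ | q <;>
          simp [hfa, hfb] at hlt hs ⊢ <;> omega
    · -- b is the winner in rest
      right; right
      rw [hf, h1]
      refine ⟨rfl, ?_, ?_⟩ <;>
      · simp only [hx]
        unfold pvLastIdx at hlt hs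
        rcases hfa : (PySem.List.enumerate rest (s+1)).reverse.find? (fun p => p.2 == a) with _ | p <;>
        rcases hfb : (PySem.List.enumerate rest (s+1)).reverse.find? (fun p => p.2 == b) with _ | q <;>
          simp [hfa, hfb] at hlt hs ⊢ <;> omega

-- Per axis: B's index-comparison selection agrees with the reverse first-match selection.
theorem pvAxis (a b : String) (hab : a ≠ b) (parts : List String) (va vb vc : Int) :
    (if ((PySem.List.enumerate parts).foldl (fun d p => d.insert p.2 p.1)
          PySem.Dict.empty).getD a (-1) <
        ((PySem.List.enumerate parts).foldl (fun d p => d.insert p.2 p.1)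
          PySem.Dict.empty).getD b (-1) then vb
     else if 0 ≤ ((PySem.List.enumerate parts).foldl (fun d p => d.insert p.2 p.1)
          PySem.Dict.empty).getD a (-1) then va
     else vc) =
    (match parts.reverse.find? (fun t => t == a || t == b) with
      | some t => if t = a then va else vb
      | none => vc) := by
  have hda : ((PySem.List.enumerate parts).foldl (fun d p => d.insert p.2 p.1)
      PySem.Dict.empty).getD a (-1) = pvLastIdx a parts 0 := by
    rw [pvDict_getD_last]
    unfold pvLastIdx
    cases (PySem.List.enumerate parts 0).reverse.find? (fun p => p.2 == a) <;> simp
  have hdb : ((PySem.List.enumerate parts).foldl (fun d p => d.insert p.2 p.1)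
      PySem.Dict.empty).getD b (-1) = pvLastIdx b parts 0 := by
    rw [pvDict_getD_last]
    unfold pvLastIdx
    cases (PySem.List.enumerate parts 0).reverse.find? (fun p => p.2 == b) <;> simp
  rw [hda, hdb]
  rcases pvTrich a b hab parts 0 with ⟨h, ha, hb⟩ | ⟨h, hlt, hs⟩ | ⟨h, hlt, hs⟩ <;> rw [h]
  · rw [ha, hb]; norm_num
  · rw [if_neg (by omega), if_pos (by omega)]; simp
  · rw [if_pos (by omega)]; simp [Ne.symm hab]

-- ===== VERDICT (by name: the statement is the Claim_ definition above) =====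
theorem parse_anchor_py_spec : Claim_equal_parse_anchor_py := by
  intro placement sprite_x sprite_y sprite_w sprite_h _
  unfold Spec_parse_anchor_py parse_anchor_py parse_anchor_py_alt
  generalize PySem.Str.replace (PySem.Str.lower placement) "-" "_" = p
  by_cases hin : PySem.Str.isIn "_" p = true
  · simp only [hin, if_true]
    rw [pvFoldl_eq_find]
    rw [pvAxis "left" "right" (by decide) ((PySem.Str.split? p "_").getD []) sprite_x (sprite_x + sprite_w) (sprite_x + PySem.Int.floordiv sprite_w 2)]
    rw [pvAxis "top" "bottom" (by decide) ((PySem.Str.split? p "_").getD []) sprite_y (sprite_y + sprite_h) (sprite_y + PySem.Int.floordiv sprite_h 2)]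
  · -- no "_" in p: the split is [p]
    have hsplit : PySem.Str.split? p "_" = some [p] := by
      unfold PySem.Str.split?
      rw [pvSplit_no_sep p.toList ("_".toList) (by decide)
        (by simpa [PySem.Str.isIn] using (Bool.not_eq_true _).mp hin)]
      simp
    simp only [Bool.not_eq_true] at hin
    simp only [hin, Bool.false_eq_true, if_false]
    rw [pvAxis "left" "right" (by decide) ((PySem.Str.split? p "_").getD []) sprite_x (sprite_x + sprite_w) (sprite_x + PySem.Int.floordiv sprite_w 2)]
    rw [pvAxis "top" "bottom" (by decide) ((PySem.Str.split? p "_").getD []) sprite_y (sprite_y + sprite_h) (sprite_y + PySem.Int.floordiv sprite_h 2)]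
    rw [hsplit]
    simp only [Option.getD_some, List.reverse_singleton, List.find?_singleton]
    by_cases h1 : p = "center"
    · subst h1; simp
    · by_cases h2 : p = "right"
      · subst h2; simp
      · by_cases h3 : p = "left"
        · subst h3; simp
        · by_cases h4 : p = "top"
          · subst h4; simp
          · by_cases h5 : p = "bottom"
            · subst h5; simp
            · simp [h1, h2, h3, h4, h5]
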